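-- pv_equiv track=rewrite | github.com/kaapyth0n/uPyLoRaWAN | FrSet.py | binary_to_ascii
-- ===== SOURCE A (Python) =====
-- def binary_to_ascii(binary_data):
--     result = []
--     length = min(128, len(binary_data))  # Ограничение длины строки до 128 байт
--
--     for byte in binary_data[:length]:
--         if byte == 0x00:  # Остановка при обнаружении 0x00
--             break
--         elif 32 <= byte <= 126:  # Печатаемые ASCII символы
--             result.append(chr(byte))
--         else:  # Непечатаемые символы
--             result.append(f"\\x{byte:02x}")
--
--     return ''.join(result)
-- ===== SOURCE B (Python) =====
-- def binary_to_ascii(binary_data):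
--     # Recursive descent over indices: no accumulator list, no join, no slice,
--     # no break; the string is built head-first by concatenation.
--     def go(i):
--         if i >= 128 or i >= len(binary_data):
--             return ''
--         b = binary_data[i]
--         if b == 0x00:
--             return ''
--         piece = chr(b) if 32 <= b <= 126 else f"\\x{b:02x}"
--         return piece + go(i + 1)
--     return go(0)
-- ===== Notes on version B (the rewrite author's own statement) =====
-- stated objective: alternative
-- what changed: B replaces A's iterative loop-with-break-and-accumulator-plus-join by a recursive descent over indices that builds the string head-first by concatenation, with the 128 cap, end-of-data and the 0x00 terminator all expressed as recursion base cases.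
import Mathlib
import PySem

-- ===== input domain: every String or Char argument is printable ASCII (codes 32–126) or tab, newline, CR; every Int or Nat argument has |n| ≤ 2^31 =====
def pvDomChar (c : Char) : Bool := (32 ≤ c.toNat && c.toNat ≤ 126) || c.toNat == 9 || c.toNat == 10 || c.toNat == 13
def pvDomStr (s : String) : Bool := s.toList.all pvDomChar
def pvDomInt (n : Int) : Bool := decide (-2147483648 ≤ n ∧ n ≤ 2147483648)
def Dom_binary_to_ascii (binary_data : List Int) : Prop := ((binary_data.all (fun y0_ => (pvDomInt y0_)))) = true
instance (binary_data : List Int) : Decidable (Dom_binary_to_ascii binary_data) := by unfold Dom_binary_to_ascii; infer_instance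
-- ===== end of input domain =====

-- B replaces A's loop-with-break + accumulator + join by a recursive index descent
-- building the string head-first; same O(n) cost, return value proved equal.

-- ===== PORT A =====
-- shared rendering of one byte, identical text in both Pythons:
-- chr(byte) for 32 <= byte <= 126, else f"\\x{byte:02x}" (exact, incl. negative ints: '-' then hex digits, zero-padded to total width 2)
def pvHexDigit (n : Nat) : Char := if n < 10 then Char.ofNat (48 + n) else Char.ofNat (87 + n)

def pvHexNat (n : Nat) : List Char :=
  if _h : n < 16 then [pvHexDigit n]
  else pvHexNat (n / 16) ++ [pvHexDigit (n % 16)]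
decreasing_by exact Nat.div_lt_self (by omega) (by omega)

-- f"{n:02x}" : zero-pad to total width 2 (the sign counts toward the width)
def pvHex02 (n : Int) : List Char :=
  if n < 0 then '-' :: pvHexNat (-n).toNat
  else (fun ds => if ds.length < 2 then '0' :: ds else ds) (pvHexNat n.toNat)

def pvRender (b : Int) : List Char :=
  if 32 ≤ b ∧ b ≤ 126 then [Char.ofNat b.toNat] else '\\' :: 'x' :: pvHex02 b

-- A's for-loop with break, over binary_data[:length]; result is the list of appended strings
def pvALoop : List Int → List (List Char) → List (List Char)
  | [], acc => acc
  | b :: rest, acc => if b = 0 then acc else pvALoop rest (acc ++ [pvRender b])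

def binary_to_ascii (binary_data : List Int) : String :=
  let length : Int := min 128 (PySem.List.len binary_data)
  String.mk (pvALoop (PySem.List.slice binary_data none (some length)) []).flatten

-- ===== PORT B =====
-- B's recursive go(i): stop at i ≥ 128, i ≥ len, or binary_data[i] == 0; else piece + go(i+1)
def pvBGo (bd : List Int) (i : Nat) : List Char :=
  if h : 128 ≤ i ∨ bd.length ≤ i then []
  else
    let b := bd[i]'(by omega)
    if b = 0 then []
    else pvRender b ++ pvBGo bd (i + 1)
termination_by 128 - i
decreasing_by omega

def binary_to_ascii_alt (binary_data : List Int) : String :=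
  String.mk (pvBGo binary_data 0)

-- ===== PRECONDITION & SPEC =====
def Spec_binary_to_ascii (binary_data : List Int) (out : String) : Prop := out = binary_to_ascii_alt binary_data
instance (binary_data : List Int) (out : String) : Decidable (Spec_binary_to_ascii binary_data out) := by unfold Spec_binary_to_ascii; infer_instance

-- ===== CLAIM (what is proved, stated in full; the proofs are below) =====
def Claim_equal_binary_to_ascii : Prop := ∀ (binary_data : List Int), Dom_binary_to_ascii binary_data → Spec_binary_to_ascii binary_data (binary_to_ascii binary_data)

-- ===== LEMMAS AND PROOFS =====

-- renderings of the prefix before the first 0 of L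
def pvF (L : List Int) : List Char :=
  (L.take (L.findIdx (fun b => b == 0))).flatMap pvRender

-- A's loop appends exactly the renderings of the prefix before the first 0
theorem pvALoop_eq (L : List Int) (acc : List (List Char)) :
    pvALoop L acc = acc ++ (L.take (L.findIdx (fun b => b == 0))).map pvRender := by
  induction L generalizing acc with
  | nil => simp [pvALoop]
  | cons b rest ih =>
    by_cases hb : b = 0
    · simp [pvALoop, hb, List.findIdx_cons]
    · have hfi : (b :: rest).findIdx (fun b => b == 0) =
          rest.findIdx (fun b => b == 0) + 1 := by
        have hb' : (b == 0) = false := by simpa using hb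
        simp [List.findIdx_cons, hb']
      rw [pvALoop, if_neg hb, ih, hfi]
      simp

-- A's slice binary_data[:min 128 len] is take 128
theorem pvSlice_eq (xs : List Int) :
    PySem.List.slice xs none (some (min 128 (PySem.List.len xs))) = xs.take 128 := by
  have h0 : (0:Int) ≤ min 128 (PySem.List.len xs) := by
    simp only [PySem.List.len_eq]; omega
  rw [PySem.List.slice_to _ h0]
  have hmin : (min 128 (PySem.List.len xs)).toNat = min 128 xs.length := by
    simp only [PySem.List.len_eq]; omega
  rw [hmin]
  rcases le_total xs.length 128 with h | h
  · rw [Nat.min_eq_right h, List.take_length, List.take_of_length_le h]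
  · rw [Nat.min_eq_left h]

-- B's recursion computes pvF of the window bd[i : min 128 len]
theorem pvBGo_eq (bd : List Int) (i : Nat) :
    pvBGo bd i = pvF ((bd.drop i).take (128 - i)) := by
  by_cases h : 128 ≤ i ∨ bd.length ≤ i
  · rw [pvBGo, dif_pos h]
    rcases h with h | h
    · have : 128 - i = 0 := by omega
      simp [this, pvF]
    · simp [List.drop_eq_nil_of_le h, pvF]
  · push_neg at h
    have hi : i < bd.length := h.2
    have hdrop : bd.drop i = bd[i] :: bd.drop (i + 1) :=
      List.drop_eq_getElem_cons hi
    have htk : (bd.drop i).take (128 - i)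
        = bd[i] :: (bd.drop (i + 1)).take (128 - (i + 1)) := by
      rw [hdrop]
      have : 128 - i = (128 - (i + 1)) + 1 := by omega
      rw [this, List.take_succ_cons]
    rw [pvBGo, dif_neg (by omega)]
    by_cases hb : bd[i] = 0
    · simp only [hb, if_pos rfl]
      rw [htk, hb]
      simp [pvF, List.findIdx_cons]
    · have hb' : ((bd[i] : Int) == 0) = false := by simpa using hb
      simp only [if_neg hb]
      rw [pvBGo_eq bd (i + 1), htk]
      simp [pvF, List.findIdx_cons, hb', List.take_succ_cons]
termination_by 128 - i
decreasing_by omega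

-- ===== VERDICT (by name: the statement is the Claim_ definition above) =====
theorem binary_to_ascii_spec : Claim_equal_binary_to_ascii := by
  intro bd _
  unfold Spec_binary_to_ascii binary_to_ascii binary_to_ascii_alt
  simp only []
  rw [pvSlice_eq, pvALoop_eq, pvBGo_eq]
  simp [pvF, List.flatMap_eq_foldl]
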